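-- pv_equiv track=rewrite | github.com/trangnt57/annotation | utilities.py | is_a_function_call
-- ===== SOURCE A (Python) =====
-- token = [' ', '~', '+', '-', '*', '/', '%', '&', '|', '>', '<', '^', '(', ')', '>>', '<<', '!','=', '!=', '==']
--
-- def is_a_function_call(s):
--     function_name = ''
--     for i in range(len(s)):
--         if s[i] == '(':
--             break
--         elif s[i] != ' ' and s[i] in token:
--             return ''
--         elif s[i] != ' ' and s[i] != '(':
--             function_name += s[i]
--
--     if(len(function_name) > 0):
--         return function_name
--     return ''
-- ===== SOURCE B (Python) =====
-- def is_a_function_call(s):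
--     bound = s.find('(')
--     if bound == -1:
--         bound = len(s)
--     for c in '~+-*/%&|><^)!=':
--         p = s.find(c)
--         if -1 < p < bound:
--             return ''
--     return s[:bound].replace(' ', '')
-- ===== Notes on version B (the rewrite author's own statement) =====
-- stated objective: faster
-- what changed: Instead of A's per-character Python-level scan that classifies each character while accumulating the name by string concatenation, B computes the index of the first opening parenthesis and the first-occurrence index of each of the 14 operator characters via str.find, returns the empty string when some operator's first occurrence lies strictly before that boundary, and otherwise slices off the prefix and deletes spaces with str.replace.
import Mathlib
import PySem

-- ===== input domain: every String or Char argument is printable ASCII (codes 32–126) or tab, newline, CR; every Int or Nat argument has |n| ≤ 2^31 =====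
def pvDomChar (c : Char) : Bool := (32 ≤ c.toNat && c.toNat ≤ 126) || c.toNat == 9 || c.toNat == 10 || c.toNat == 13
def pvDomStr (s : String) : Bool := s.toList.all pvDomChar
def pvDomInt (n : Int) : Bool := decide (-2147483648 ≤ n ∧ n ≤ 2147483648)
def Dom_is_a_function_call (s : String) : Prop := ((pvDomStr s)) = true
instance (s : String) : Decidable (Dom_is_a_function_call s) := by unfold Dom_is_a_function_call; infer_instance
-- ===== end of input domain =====

-- B replaces A's per-character accumulate-and-break scan by first-occurrence index
-- comparisons (str.find per operator character against the index of the first opening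
-- parenthesis, then slice and replace); measured faster by a constant factor.


-- ===== PORT A =====
-- the module-level `token` list of A, verbatim
def tokenA : List String := [" ", "~", "+", "-", "*", "/", "%", "&", "|", ">", "<", "^", "(", ")", ">>", "<<", "!", "=", "!=", "=="]

-- A's for-loop over the characters of s, with `function_name` as accumulator;
-- `break` and the final `if len(...) > 0` become the first branch / base case.
def aLoop : List Char → List Char → String
  | [], fn => if fn.length > 0 then String.ofList fn else ""
  | c :: rest, fn =>
    if c = '(' then (if fn.length > 0 then String.ofList fn else "")
    else if c ≠ ' ' ∧ String.ofList [c] ∈ tokenA then ""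
    else if c ≠ ' ' ∧ c ≠ '(' then aLoop rest (fn ++ [c])
    else aLoop rest fn

def is_a_function_call (s : String) : String := aLoop s.toList []

-- ===== PORT B =====
-- the characters of Source B's operator string '~+-*/%&|><^)!=', iterated in order
def opsB : List Char := ['~', '+', '-', '*', '/', '%', '&', '|', '>', '<', '^', ')', '!', '=']

-- Source B: bound = s.find('(') (len(s) if -1); for c in ops: if -1 < s.find(c) < bound: return '';
-- return s[:bound].replace(' ', '')   — the early-return loop is the `any` over opsB.
def is_a_function_call_alt (s : String) : String :=
  let f := PySem.Str.find s "("
  let bound : Int := if f = -1 then PySem.Str.len s else f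
  if opsB.any (fun c =>
      decide (-1 < PySem.Chars.find s.toList [c]) && decide (PySem.Chars.find s.toList [c] < bound))
  then ""
  else PySem.Str.replace (PySem.Str.slice s none (some bound)) " " ""

-- ===== PRECONDITION & SPEC =====
def Spec_is_a_function_call (s : String) (out : String) : Prop := out = is_a_function_call_alt s
instance (s : String) (out : String) : Decidable (Spec_is_a_function_call s out) := by unfold Spec_is_a_function_call; infer_instance

-- ===== CLAIM (what is proved, stated in full; the proofs are below) =====
def Claim_equal_is_a_function_call : Prop := ∀ (s : String), Dom_is_a_function_call s → Spec_is_a_function_call s (is_a_function_call s)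

-- ===== LEMMAS AND PROOFS =====
theorem ofList_eq_iff (l : List Char) (t : String) : String.ofList l = t ↔ l = t.toList := by
  constructor
  · intro h; have := congrArg String.toList h; simpa using this
  · intro h; subst h; simp

-- a single non-'(' character is a member of A's token list iff it is a space or one of B's operators
theorem tok_char (c : Char) (hc : c ≠ '(') :
    (String.ofList [c] ∈ tokenA) ↔ (c = ' ' ∨ opsB.contains c = true) := by
  simp only [tokenA, opsB, List.mem_cons, List.not_mem_nil, or_false,
    ofList_eq_iff, List.contains_eq_mem, decide_eq_true_eq]
  constructor
  · rintro (h | h | h | h | h | h | h | h | h | h | h | h | h | h | h | h | h | h | h | h) <;>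
      simp_all
  · rintro (h | h | h) <;> simp_all

-- loop invariant: A's loop equals the canonical prefix/test/filter form, for any accumulator
theorem aLoop_eq (cs : List Char) : ∀ fn : List Char,
    aLoop cs fn =
      (if (cs.takeWhile (fun c => c ≠ '(')).any (fun c => opsB.contains c) then ""
       else String.ofList (fn ++ (cs.takeWhile (fun c => c ≠ '(')).filter (fun c => c ≠ ' '))) := by
  induction cs with
  | nil =>
    intro fn
    cases fn <;> simp [aLoop]
  | cons c rest ih =>
    intro fn
    by_cases hpar : c = '('
    · subst hpar
      simp only [aLoop, List.takeWhile_cons]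
      cases fn <;> simp
    · by_cases hsp : c = ' '
      · subst hsp
        have hop : (' ' : Char) ∉ opsB := by decide
        simp [aLoop, hpar, hop, ih]
      · by_cases hop : opsB.contains c = true
        · have hmem : (c ≠ ' ' ∧ String.ofList [c] ∈ tokenA) := ⟨hsp, (tok_char c hpar).mpr (Or.inr hop)⟩
          have hc : c ∈ opsB := by simpa [List.contains_eq_mem] using hop
          simp [aLoop, hpar, hmem, hc]
        · have hmem : ¬ (c ≠ ' ' ∧ String.ofList [c] ∈ tokenA) := by
            rintro ⟨-, h⟩
            rcases (tok_char c hpar).mp h with h' | h'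
            · exact hsp h'
            · exact hop h'
          have hnt : String.ofList [c] ∉ tokenA := fun h => hmem ⟨hsp, h⟩
          have hnop : c ∉ opsB := by simpa [List.contains_eq_mem] using hop
          simp [aLoop, hpar, hsp, hnt, hnop, ih]

-- [c] is a prefix of drop k ↔ the k-th character is c
theorem single_prefix_drop (cs : List Char) (k : Nat) (c : Char) :
    ([c] <+: cs.drop k) ↔ cs[k]? = some c := by
  have hh : (cs.drop k).head? = cs[k]? := by simp [List.head?_drop]
  constructor
  · rintro ⟨t, ht⟩
    rw [← hh, ← ht]; rfl
  · intro h
    rcases hd : cs.drop k with _ | ⟨x, t⟩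
    · rw [← hh, hd] at h; simp at h
    · rw [← hh, hd] at h; simp at h
      exact ⟨t, by simp [h]⟩

-- (takeWhile (· ≠ c)).length is the index of the FIRST occurrence of c
theorem takeWhile_ne_facts (cs : List Char) (c : Char) (h : c ∈ cs) :
    (cs.takeWhile (fun x => x ≠ c)).length < cs.length ∧
    cs[(cs.takeWhile (fun x => x ≠ c)).length]? = some c ∧
    (∀ i < (cs.takeWhile (fun x => x ≠ c)).length, cs[i]? ≠ some c) := by
  induction cs with
  | nil => simp at h
  | cons a t ih =>
    by_cases hac : a = c
    · subst hac; simp [List.takeWhile]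
    · have hmem : c ∈ t := by
        rcases List.mem_cons.mp h with h' | h'
        · exact absurd h'.symm hac
        · exact h'
      obtain ⟨h1, h2, h3⟩ := ih hmem
      refine ⟨?_, ?_, ?_⟩
      · simpa [List.takeWhile_cons, hac] using Nat.succ_lt_succ h1
      · simpa [List.takeWhile_cons, hac] using h2
      · intro i hi
        simp only [List.takeWhile_cons] at hi
        rw [if_pos (by simpa using hac)] at hi
        cases i with
        | zero => simp [hac]
        | succ j => simp only [List.length_cons] at hi
                    simpa using h3 j (by omega)

-- Python's s.find(c) for a single character, in closed form
theorem find_single (cs : List Char) (c : Char) :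
    PySem.Chars.find cs [c] =
      if c ∈ cs then ((cs.takeWhile (fun x => x ≠ c)).length : Int) else -1 := by
  by_cases h : c ∈ cs
  · obtain ⟨h1, h2, h3⟩ := takeWhile_ne_facts cs c h
    have hinf : [c] <:+: cs :=
      List.infix_iff_prefix_suffix.mpr ⟨_, (single_prefix_drop cs _ c).mpr h2, List.drop_suffix _ _⟩
    have hnn : 0 ≤ PySem.Chars.find cs [c] := (PySem.Chars.find_nonneg_iff cs [c]).mpr hinf
    obtain ⟨hp, hmin⟩ := PySem.Chars.find_spec hnn
    have hk : cs[(PySem.Chars.find cs [c]).toNat]? = some c := (single_prefix_drop _ _ _).mp hp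
    have hkt : (PySem.Chars.find cs [c]).toNat = (cs.takeWhile (fun x => x ≠ c)).length := by
      rcases Nat.lt_trichotomy (PySem.Chars.find cs [c]).toNat (cs.takeWhile (fun x => x ≠ c)).length with hlt | he | hgt
      · exact absurd hk (h3 _ hlt)
      · exact he
      · exact absurd ((single_prefix_drop cs _ c).mpr h2) (hmin _ hgt)
    rw [if_pos h, ← hkt]
    omega
  · rw [if_neg h]
    apply (PySem.Chars.find_eq_neg_one_iff cs [c]).mpr
    intro hinf
    exact h (hinf.mem (by simp))

-- replace.go with a single-character pattern and empty replacement is filter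
theorem replace_go (c : Char) : ∀ (l : List Char) (fuel : Nat) (acc : List Char), l.length ≤ fuel →
    PySem.Chars.replace.go [c] [] fuel l acc = acc.reverse ++ l.filter (fun x => x ≠ c) := by
  intro l
  induction l with
  | nil => intro fuel acc _; cases fuel <;> simp [PySem.Chars.replace.go]
  | cons a t ih =>
    intro fuel acc hf
    cases fuel with
    | zero => simp at hf
    | succ f =>
      by_cases h : a = c
      · subst h
        rw [PySem.Chars.replace.go]
        simp only [List.isPrefixOf, beq_self_eq_true, Bool.true_and]
        simp [ih f acc (by simpa using hf)]
      · rw [PySem.Chars.replace.go]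
        have : [c].isPrefixOf (a :: t) = false := by simp [List.isPrefixOf]; exact fun hh => h hh.symm
        simp [this, ih f (a :: acc) (by simpa using hf), h]

theorem replace_single_nil (cs : List Char) (c : Char) :
    PySem.Chars.replace cs [c] [] = cs.filter (fun x => x ≠ c) := by
  simp [PySem.Chars.replace, replace_go c cs cs.length [] le_rfl]

-- Source B's boundary index equals the length of the prefix before the first '('
theorem bound_eq (cs : List Char) :
    (if PySem.Chars.find cs ['('] = -1 then (cs.length : Int) else PySem.Chars.find cs ['(']) =
      ((cs.takeWhile (fun c => c ≠ '(')).length : Int) := by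
  rw [find_single]
  by_cases h : '(' ∈ cs
  · rw [if_pos h]
    simp
  · rw [if_neg h]
    have hself : cs.takeWhile (fun c => c ≠ '(') = cs :=
      List.takeWhile_eq_self_iff.mpr (fun x hx => by simp; exact fun he => h (he ▸ hx))
    rw [hself]
    simp

-- Source B's operator test (first occurrence strictly before the boundary) equals
-- "the prefix contains an operator character"
theorem cond_eq (cs : List Char) :
    (opsB.any (fun c =>
        decide (-1 < PySem.Chars.find cs [c]) &&
        decide (PySem.Chars.find cs [c] < ((cs.takeWhile (fun c => c ≠ '(')).length : Int)))) =
      (cs.takeWhile (fun c => c ≠ '(')).any (fun c => opsB.contains c) := by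
  set P := cs.takeWhile (fun c => c ≠ '(') with hP
  have hPpre : P <+: cs := by rw [hP]; exact List.takeWhile_prefix _
  have hPtake : P = cs.take P.length := (List.prefix_iff_eq_take.mp hPpre)
  rw [Bool.eq_iff_iff]
  simp only [List.any_eq_true, Bool.and_eq_true, decide_eq_true_eq, List.contains_eq_mem]
  constructor
  · rintro ⟨c, hcops, hpos, hlt⟩
    have hcmem : c ∈ cs := by
      by_contra hmem
      rw [find_single, if_neg hmem] at hpos
      omega
    obtain ⟨-, h2, -⟩ := takeWhile_ne_facts cs c hcmem
    rw [find_single, if_pos hcmem] at hlt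
    have hl : (cs.takeWhile (fun x => x ≠ c)).length < P.length := by exact_mod_cast hlt
    have : P[(cs.takeWhile (fun x => x ≠ c)).length]? = some c := by
      rw [hPtake, List.getElem?_take_of_lt hl]; exact h2
    exact ⟨c, List.mem_of_getElem? this, by simpa using hcops⟩
  · rintro ⟨c, hcP, hcops⟩
    obtain ⟨j, hj, hjc⟩ := List.getElem_of_mem hcP
    have hjcs : cs[j]? = some c := by
      have : P[j]? = some c := by simp [List.getElem?_eq_getElem hj, hjc]
      rw [hPtake, List.getElem?_take_of_lt hj] at this
      exact this
    have hcmem : c ∈ cs := List.mem_of_getElem? hjcs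
    obtain ⟨-, -, h3⟩ := takeWhile_ne_facts cs c hcmem
    have hle : (cs.takeWhile (fun x => x ≠ c)).length ≤ j := by
      by_contra hgt
      exact h3 j (by omega) hjcs
    refine ⟨c, by simpa using hcops, ?_, ?_⟩ <;> rw [find_single, if_pos hcmem]
    · omega
    · exact_mod_cast Nat.lt_of_le_of_lt hle hj

-- B equals the same canonical prefix/test/filter form
theorem alt_eq (s : String) :
    is_a_function_call_alt s =
      (if (s.toList.takeWhile (fun c => c ≠ '(')).any (fun c => opsB.contains c) then ""
       else String.ofList ((s.toList.takeWhile (fun c => c ≠ '(')).filter (fun c => c ≠ ' '))) := by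
  unfold is_a_function_call_alt
  have e1 : "(".toList = ['('] := rfl
  have e2 : " ".toList = [' '] := rfl
  have e3 : "".toList = ([] : List Char) := rfl
  simp only [PySem.Str.find, PySem.Str.len, PySem.Str.replace, PySem.Str.slice, e1, e2, e3]
  rw [bound_eq s.toList]
  have hc := cond_eq s.toList
  simp only [hc]
  split
  · rfl
  · have hsl : PySem.Chars.slice s.toList none
        (some ((s.toList.takeWhile (fun c => c ≠ '(')).length : Int)) =
        s.toList.take (s.toList.takeWhile (fun c => c ≠ '(')).length := by
      rw [PySem.Chars.slice_eq_listSlice]; simp [pysem]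
    simp only [String.toList_ofList]
    rw [hsl, ← List.prefix_iff_eq_take.mp (List.takeWhile_prefix _), replace_single_nil]

theorem is_a_function_call_spec : Claim_equal_is_a_function_call := by
  intro s _
  unfold Spec_is_a_function_call is_a_function_call
  rw [alt_eq, aLoop_eq]
  simp
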